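-- pv_equiv track=rewrite | github.com/SawsanAbdulbari/recipe_finder | src/utils.py | parse_ingredients
-- ===== SOURCE A (Python) =====
-- from typing import List, Tuple
--
-- def parse_ingredients(text: str) -> List[str]:
--     """
--     Parse ingredients from text into a list
--
--     Args:
--         text: Text containing ingredients
--
--     Returns:
--         List of ingredients
--     """
--     # Split by common separators
--     separators = [",", " and ", " & ", ";"]
--
--     ingredients = [text]
--     for sep in separators:
--         new_ingredients = []
--         for ing in ingredients:
--             new_ingredients.extend(ing.split(sep))
--         ingredients = new_ingredients
--
--     # Clean each ingredient
--     ingredients = [ing.strip() for ing in ingredients if ing.strip()]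
--
--     return ingredients
-- ===== SOURCE B (Python) =====
-- def parse_ingredients(text):
--     """Single left-to-right scan: find every separator occurrence (",", " and ",
--     " & ", ";") in one pass instead of refining a fragment list four times."""
--     parts = []
--     buf = []
--     i, n = 0, len(text)
--     while i < n:
--         ch = text[i]
--         if ch == ',' or ch == ';':
--             parts.append(''.join(buf)); buf = []; i += 1
--         elif text.startswith(' and ', i):
--             parts.append(''.join(buf)); buf = []; i += 5
--         elif text.startswith(' & ', i):
--             parts.append(''.join(buf)); buf = []; i += 3
--         else:
--             buf.append(ch); i += 1
--     parts.append(''.join(buf))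
--     return [ing.strip() for ing in parts if ing.strip()]
-- ===== Notes on version B (the rewrite author's own statement) =====
-- stated objective: alternative
-- what changed: Replaced A's four successive split-and-flatten passes (one per separator) by a single left-to-right scan of the string that recognises all four separators in one pass, keeping the identical strip-and-drop-empty cleanup.
-- outside the precondition, e.g. on parse_ingredients(' & and b'): A returns ['&', 'b'], B returns ['and b']; on parse_ingredients(' & and '): A returns ['&'], B returns ['and']
import Mathlib
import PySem

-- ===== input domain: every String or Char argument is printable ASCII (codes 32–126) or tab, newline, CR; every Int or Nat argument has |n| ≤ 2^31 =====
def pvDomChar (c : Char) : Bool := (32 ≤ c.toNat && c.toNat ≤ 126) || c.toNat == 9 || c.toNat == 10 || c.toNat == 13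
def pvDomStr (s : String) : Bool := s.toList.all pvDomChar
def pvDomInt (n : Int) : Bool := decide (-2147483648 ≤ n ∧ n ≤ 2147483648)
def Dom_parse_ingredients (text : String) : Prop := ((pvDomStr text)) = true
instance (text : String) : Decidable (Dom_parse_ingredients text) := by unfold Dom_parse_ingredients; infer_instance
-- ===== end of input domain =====

-- B replaces A's four successive split passes with one left-to-right scan recognising
-- all four separators at once; return values agree on Pre_ (proved below).

-- ===== PORT A =====
-- A: ingredients = [text]; for each separator, re-split every fragment; then strip
-- and drop fragments whose strip is empty.  Ported over List Char via PySem.Chars.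
def parse_ingredients (text : String) : List String :=
  let separators : List (List Char) := [",".toList, " and ".toList, " & ".toList, ";".toList]
  let ingredients : List (List Char) :=
    separators.foldl
      (fun ings sep => ings.flatMap (fun ing => PySem.Chars.splitOn ing sep))
      [text.toList]
  ((ingredients.filter (fun ing => PySem.Chars.strip ing ≠ [])).map
      (fun ing => PySem.Chars.strip ing)).map String.ofList

-- ===== PORT B =====
-- B-side helper: the single scan; buf holds the current fragment, reversed
-- (mirrors Source B: one if-chain per position, startswith jumps the index).
def pvScanB : List Char → List Char → List (List Char)
  | [], buf => [buf.reverse]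
  | c :: rest, buf =>
    if c = ',' ∨ c = ';' then buf.reverse :: pvScanB rest []
    else if [' ', 'a', 'n', 'd', ' '].isPrefixOf (c :: rest) then
      buf.reverse :: pvScanB ((c :: rest).drop 5) []
    else if [' ', '&', ' '].isPrefixOf (c :: rest) then
      buf.reverse :: pvScanB ((c :: rest).drop 3) []
    else pvScanB rest (c :: buf)
termination_by l _ => l.length
decreasing_by
  · simp
  · simp only [List.length_drop, List.length_cons]; omega
  · simp only [List.length_drop, List.length_cons]; omega
  · simp

def parse_ingredients_alt (text : String) : List String :=
  let parts : List (List Char) := pvScanB text.toList []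
  ((parts.filter (fun ing => PySem.Chars.strip ing ≠ [])).map
      (fun ing => PySem.Chars.strip ing)).map String.ofList

-- ===== PRECONDITION & SPEC =====
-- Pre_ excludes texts containing " & and ", where the " & " and " and " separators
-- overlap: A's pass order splits at " and " while B's leftmost scan splits at " & ";
-- both readings are defensible, so these accidental-tie inputs are excluded.
def Pre_parse_ingredients (text : String) : Prop :=
  ¬ ((" & and ".toList) <:+: text.toList)
instance (text : String) : Decidable (Pre_parse_ingredients text) := by
  unfold Pre_parse_ingredients; infer_instance

def pvWitness_parse_ingredients : String := "eggs, milk and flour & salt; pepper"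

def Spec_parse_ingredients (text : String) (out : List String) : Prop := out = parse_ingredients_alt text
instance (text : String) (out : List String) : Decidable (Spec_parse_ingredients text out) := by unfold Spec_parse_ingredients; infer_instance

-- ===== CLAIM (what is proved, stated in full; the proofs are below) =====
def Claim_equal_parse_ingredients : Prop := ∀ (text : String), Dom_parse_ingredients text → Pre_parse_ingredients text → Spec_parse_ingredients text (parse_ingredients text)

-- ===== LEMMAS AND PROOFS =====

-- A clean fuel-free reformulation of PySem.Chars.splitOn (proof layer only).
def pvSpl (sep : List Char) (l : List Char) : List (List Char) :=
  if h : sep.isPrefixOf l ∧ sep ≠ [] then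
    [] :: pvSpl sep (l.drop sep.length)
  else
    match l with
    | [] => [[]]
    | c :: rest => (pvSpl sep rest).modifyHead (c :: ·)
termination_by l.length
decreasing_by
  · have hp : sep <+: l := List.isPrefixOf_iff_prefix.mp h.1
    have h1 : 1 ≤ sep.length := by
      cases sep with
      | nil => exact absurd rfl h.2
      | cons a t => simp
    have h2 : sep.length ≤ l.length := hp.length_le
    simp only [List.length_drop]
    omega
  · simp

lemma pvSpl_ne_nil (sep : List Char) : ∀ l, pvSpl sep l ≠ [] := by
  intro l
  induction l with
  | nil =>
    rw [pvSpl]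
    split
    · simp
    · simp
  | cons c rest ih =>
    rw [pvSpl]
    split
    · simp
    · simpa using ih

lemma pvSpl_nil (sep : List Char) (hs : sep ≠ []) : pvSpl sep [] = [[]] := by
  unfold pvSpl
  split
  · rename_i h
    exact absurd (List.isPrefixOf_iff_prefix.mp h.1).length_le (by
      cases sep with
      | nil => exact absurd rfl hs
      | cons a t => simp)
  · rfl

lemma pvSpl_prefix (sep l : List Char) (hs : sep ≠ []) (hp : sep.isPrefixOf l) :
    pvSpl sep l = [] :: pvSpl sep (l.drop sep.length) := by
  rw [pvSpl]
  simp [hp, hs]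

lemma pvSpl_sep_append (sep x : List Char) (hs : sep ≠ []) :
    pvSpl sep (sep ++ x) = [] :: pvSpl sep x := by
  rw [pvSpl_prefix sep (sep ++ x) hs (List.isPrefixOf_iff_prefix.mpr ⟨x, rfl⟩)]
  simp

lemma pvSpl_cons (sep : List Char) (c : Char) (rest : List Char)
    (hnp : ¬ sep.isPrefixOf (c :: rest)) :
    pvSpl sep (c :: rest) = (pvSpl sep rest).modifyHead (c :: ·) := by
  rw [pvSpl]
  simp [hnp]

lemma pvSpl_exists_cons (sep l : List Char) :
    ∃ h q, pvSpl sep l = h :: q := by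
  match hx : pvSpl sep l with
  | [] => exact absurd hx (pvSpl_ne_nil sep l)
  | h :: q => exact ⟨h, q, rfl⟩

-- the head fragment is a prefix of the input
lemma pvSpl_head_prefix (sep : List Char) : ∀ (l h : List Char) (q : List (List Char)),
    pvSpl sep l = h :: q → h <+: l := by
  intro l
  induction l with
  | nil =>
    intro h q he
    rw [pvSpl] at he
    split at he
    · simp only [List.cons.injEq] at he
      rw [← he.1]
    · simp only [List.cons.injEq] at he
      rw [← he.1]
  | cons c rest ih =>
    intro h q he
    rw [pvSpl] at he
    split at he
    · simp only [List.cons.injEq] at he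
      rw [← he.1]
      exact List.nil_prefix
    · replace he : (pvSpl sep rest).modifyHead (c :: ·) = h :: q := he
      obtain ⟨h', q', he'⟩ := pvSpl_exists_cons sep rest
      rw [he'] at he
      simp only [List.modifyHead_cons, List.cons.injEq] at he
      rw [← he.1]
      exact List.cons_prefix_cons.mpr ⟨rfl, ih h' q' he'⟩

-- no separator occurrence starts inside p  →  splitting p ++ x only touches x
lemma pvSpl_append_no_occ (sep : List Char) : ∀ (p x : List Char),
    (∀ i, i < p.length → ¬ sep.isPrefixOf (p.drop i ++ x)) →
    pvSpl sep (p ++ x) = (pvSpl sep x).modifyHead (p ++ ·) := by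
  intro p
  induction p with
  | nil =>
    intro x _
    simp only [List.nil_append]
    cases pvSpl sep x <;> simp
  | cons a p' ih =>
    intro x hno
    have hnp : ¬ sep.isPrefixOf (a :: (p' ++ x)) := by
      have := hno 0 (by simp)
      simpa using this
    rw [List.cons_append, pvSpl_cons sep a (p' ++ x) hnp,
      ih x (fun i hi => by
        have := hno (i + 1) (by simpa using hi)
        simpa using this)]
    cases pvSpl sep x <;> simp

-- bridge: PySem.Chars.splitOn is pvSpl
lemma go_eq_pvSpl (sep : List Char) (hs : sep ≠ []) :
    ∀ (fuel : Nat) (l cur : List Char) (acc : List (List Char)), l.length < fuel →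
    PySem.Chars.splitOn.go sep fuel l cur acc
      = acc.reverse ++ (pvSpl sep l).modifyHead (cur.reverse ++ ·) := by
  intro fuel
  induction fuel with
  | zero => intro l cur acc h; omega
  | succ fuel ih =>
    intro l cur acc h
    have hsl : 1 ≤ sep.length := List.length_pos_iff.mpr hs
    cases l with
    | nil =>
      rw [PySem.Chars.splitOn.go, pvSpl_nil sep hs] <;> simp
    | cons c rest =>
      rw [PySem.Chars.splitOn.go]
      by_cases hp : sep.isPrefixOf (c :: rest)
      · rw [if_pos hp,
          ih (List.drop sep.length (c :: rest)) [] (cur.reverse :: acc)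
            (by
              simp only [List.length_drop, List.length_cons] at *
              omega),
          pvSpl_prefix sep _ hs hp]
        simp only [List.modifyHead_cons, List.reverse_cons, List.reverse_nil,
          List.nil_append, List.append_assoc, List.singleton_append]
        cases pvSpl sep (List.drop sep.length (c :: rest)) <;> simp
      · rw [if_neg hp,
          ih rest (c :: cur) acc (by simp only [List.length_cons] at h; omega),
          pvSpl_cons sep c rest hp]
        cases pvSpl sep rest <;> simp

lemma splitOn_eq_pvSpl (l sep : List Char) (hs : sep ≠ []) :
    PySem.Chars.splitOn l sep = pvSpl sep l := by
  unfold PySem.Chars.splitOn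
  rw [go_eq_pvSpl sep hs (l.length + 1) l [] [] (by omega)]
  cases pvSpl sep l <;> simp

-- the four separators and the pipeline, stage by stage (proof layer)
def pvF1 (s : List Char) : List (List Char) := pvSpl [','] s
def pvF2 (s : List Char) : List (List Char) := (pvF1 s).flatMap (pvSpl [' ','a','n','d',' '])
def pvF3 (s : List Char) : List (List Char) := (pvF2 s).flatMap (pvSpl [' ','&',' '])
def pvF4 (s : List Char) : List (List Char) := (pvF3 s).flatMap (pvSpl [';'])

lemma flatMap_ne_nil (g : List Char → List (List Char)) (hg : ∀ x, g x ≠ [])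
    (L : List (List Char)) (hL : L ≠ []) : L.flatMap g ≠ [] := by
  cases L with
  | nil => exact absurd rfl hL
  | cons h q =>
    simp only [List.flatMap_cons, ne_eq, List.append_eq_nil_iff]
    intro ⟨h1, _⟩
    exact hg h h1

lemma pvF1_ne_nil (s : List Char) : pvF1 s ≠ [] := pvSpl_ne_nil _ _
lemma pvF2_ne_nil (s : List Char) : pvF2 s ≠ [] :=
  flatMap_ne_nil _ (pvSpl_ne_nil _) _ (pvF1_ne_nil s)
lemma pvF3_ne_nil (s : List Char) : pvF3 s ≠ [] :=
  flatMap_ne_nil _ (pvSpl_ne_nil _) _ (pvF2_ne_nil s)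

lemma modifyHead_append_left {f : List Char → List Char} (l r : List (List Char))
    (hl : l ≠ []) : l.modifyHead f ++ r = (l ++ r).modifyHead f := by
  cases l with
  | nil => exact absurd rfl hl
  | cons h q => simp

-- one refinement stage applied to a fragment list whose head got a char prepended
lemma stage_cons (sep : List Char) (c : Char) (h : List Char) (q : List (List Char))
    (hnp : ¬ sep.isPrefixOf (c :: h)) :
    ((h :: q).modifyHead (c :: ·)).flatMap (pvSpl sep)
      = ((h :: q).flatMap (pvSpl sep)).modifyHead (c :: ·) := by
  simp only [List.modifyHead_cons, List.flatMap_cons, pvSpl_cons sep c h hnp]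
  exact modifyHead_append_left _ _ (pvSpl_ne_nil _ _)

-- a stage maps an empty head fragment to an empty head fragment
lemma stage_nil_cons (sep : List Char) (hs : sep ≠ []) (L : List (List Char)) :
    (([] : List Char) :: L).flatMap (pvSpl sep) = [] :: L.flatMap (pvSpl sep) := by
  simp [pvSpl_nil sep hs]

-- a stage peels its own separator off the head fragment
lemma stage_sep (sep x : List Char) (hs : sep ≠ []) (q : List (List Char)) :
    ((sep ++ x) :: q).flatMap (pvSpl sep) = [] :: (x :: q).flatMap (pvSpl sep) := by
  simp [pvSpl_sep_append sep x hs]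

-- head fragment of each stage is a prefix of the input
lemma pvF1_head_prefix (s h : List Char) (q : List (List Char)) (he : pvF1 s = h :: q) :
    h <+: s := pvSpl_head_prefix _ _ _ _ he
lemma pvF2_head_prefix (s h : List Char) (q : List (List Char)) (he : pvF2 s = h :: q) :
    h <+: s := by
  obtain ⟨h1, q1, he1⟩ := pvSpl_exists_cons [','] s
  obtain ⟨h2, q2, he2⟩ := pvSpl_exists_cons [' ','a','n','d',' '] h1
  unfold pvF2 pvF1 at he
  rw [he1, List.flatMap_cons, he2, List.cons_append] at he
  simp only [List.cons.injEq] at he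
  rw [← he.1]
  exact (pvSpl_head_prefix _ _ _ _ he2).trans (pvSpl_head_prefix _ _ _ _ he1)
lemma pvF3_head_prefix (s h : List Char) (q : List (List Char)) (he : pvF3 s = h :: q) :
    h <+: s := by
  obtain ⟨h2, q2, he2⟩ := List.exists_cons_of_ne_nil (pvF2_ne_nil s)
  obtain ⟨h3, q3, he3⟩ := pvSpl_exists_cons [' ','&',' '] h2
  unfold pvF3 at he
  rw [he2, List.flatMap_cons, he3, List.cons_append] at he
  simp only [List.cons.injEq] at he
  rw [← he.1]
  exact (pvSpl_head_prefix _ _ _ _ he3).trans (pvF2_head_prefix _ _ _ he2)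

lemma prefix_append_both (p l m : List Char) (h : l <+: m) : p ++ l <+: p ++ m := by
  obtain ⟨r, rfl⟩ := h
  exact ⟨r, by simp⟩

-- stage-wise cons lemmas ---------------------------------------------------

lemma pvF4_comma (t : List Char) : pvF4 (',' :: t) = [] :: pvF4 t := by
  unfold pvF4 pvF3 pvF2 pvF1
  have h1 : pvSpl [','] (',' :: t) = [] :: pvSpl [','] t := by
    simpa using pvSpl_sep_append [','] t (by simp)
  rw [h1, stage_nil_cons _ (by simp), stage_nil_cons _ (by simp),
    stage_nil_cons _ (by simp)]

lemma pvF4_semi (t : List Char) : pvF4 (';' :: t) = [] :: pvF4 t := by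
  obtain ⟨h1, q1, he1⟩ := List.exists_cons_of_ne_nil (pvF1_ne_nil t)
  obtain ⟨h2, q2, he2⟩ := List.exists_cons_of_ne_nil (pvF2_ne_nil t)
  obtain ⟨h3, q3, he3⟩ := List.exists_cons_of_ne_nil (pvF3_ne_nil t)
  have e1 : pvF1 (';' :: t) = (pvF1 t).modifyHead (';' :: ·) := by
    unfold pvF1
    exact pvSpl_cons _ _ _ (by simp [List.isPrefixOf])
  have e2 : pvF2 (';' :: t) = (pvF2 t).modifyHead (';' :: ·) := by
    unfold pvF2
    rw [e1, he1]
    exact stage_cons _ _ _ _ (by simp [List.isPrefixOf])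
  have e3 : pvF3 (';' :: t) = (pvF3 t).modifyHead (';' :: ·) := by
    unfold pvF3
    rw [e2, he2]
    exact stage_cons _ _ _ _ (by simp [List.isPrefixOf])
  unfold pvF4
  rw [e3, he3, List.modifyHead_cons,
    show (';' :: h3) = [';'] ++ h3 from rfl, stage_sep _ _ (by simp)]

lemma pvF4_and (t : List Char) : pvF4 ([' ','a','n','d',' '] ++ t) = [] :: pvF4 t := by
  obtain ⟨h1, q1, he1⟩ := List.exists_cons_of_ne_nil (pvF1_ne_nil t)
  have e1 : pvF1 ([' ','a','n','d',' '] ++ t) = (pvF1 t).modifyHead ([' ','a','n','d',' '] ++ ·) := by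
    unfold pvF1
    refine pvSpl_append_no_occ [','] _ t ?_
    intro i hi
    simp only [List.length_cons, List.length_nil] at hi
    interval_cases i <;> simp [List.isPrefixOf]
  have e2 : pvF2 ([' ','a','n','d',' '] ++ t) = [] :: pvF2 t := by
    unfold pvF2
    rw [e1, he1, List.modifyHead_cons, stage_sep _ _ (by simp)]
  unfold pvF4 pvF3
  rw [e2, stage_nil_cons _ (by simp), stage_nil_cons _ (by simp)]

lemma pvF4_amp (t : List Char)
    (hpre : ¬ ([' ','&',' ','a','n','d',' '] <+: ([' ','&',' '] ++ t))) :
    pvF4 ([' ','&',' '] ++ t) = [] :: pvF4 t := by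
  obtain ⟨h1, q1, he1⟩ := List.exists_cons_of_ne_nil (pvF1_ne_nil t)
  obtain ⟨h2, q2, he2⟩ := List.exists_cons_of_ne_nil (pvF2_ne_nil t)
  have hp1 : h1 <+: t := pvF1_head_prefix t h1 q1 he1
  have e1 : pvF1 ([' ','&',' '] ++ t) = (pvF1 t).modifyHead ([' ','&',' '] ++ ·) := by
    unfold pvF1
    refine pvSpl_append_no_occ [','] _ t ?_
    intro i hi
    simp only [List.length_cons, List.length_nil] at hi
    interval_cases i <;> simp [List.isPrefixOf]
  have hno2 : ∀ i, i < ([' ','&',' '] : List Char).length →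
      ¬ ([' ','a','n','d',' '] : List Char).isPrefixOf (([' ','&',' '] : List Char).drop i ++ h1) := by
    intro i hi
    simp only [List.length_cons, List.length_nil] at hi
    interval_cases i
    · simp [List.isPrefixOf]
    · simp [List.isPrefixOf]
    · -- a match here would mean " & and " occurs in the input
      intro hmatch
      rw [List.isPrefixOf_iff_prefix] at hmatch
      simp only [List.drop, List.singleton_append] at hmatch
      rw [List.cons_prefix_cons] at hmatch
      apply hpre
      have h4 : ([' ','&',' ','a','n','d',' '] : List Char) <+: [' ','&',' '] ++ h1 := by
        have := prefix_append_both [' ','&',' '] _ _ hmatch.2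
        simpa using this
      exact h4.trans (prefix_append_both [' ','&',' '] _ _ hp1)
  have e2 : pvF2 ([' ','&',' '] ++ t) = (pvF2 t).modifyHead ([' ','&',' '] ++ ·) := by
    unfold pvF2
    rw [e1, he1, List.modifyHead_cons, List.flatMap_cons, List.flatMap_cons,
      pvSpl_append_no_occ _ _ _ hno2,
      modifyHead_append_left _ _ (pvSpl_ne_nil _ _)]
  have e3 : pvF3 ([' ','&',' '] ++ t) = [] :: pvF3 t := by
    unfold pvF3
    rw [e2, he2, List.modifyHead_cons, stage_sep _ _ (by simp)]
  unfold pvF4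
  rw [e3, stage_nil_cons _ (by simp)]

lemma pvF4_char (c : Char) (t : List Char) (hc : c ≠ ',') (hsc : c ≠ ';')
    (hand : ¬ ([' ','a','n','d',' '] : List Char).isPrefixOf (c :: t))
    (hamp : ¬ ([' ','&',' '] : List Char).isPrefixOf (c :: t)) :
    pvF4 (c :: t) = (pvF4 t).modifyHead (c :: ·) := by
  obtain ⟨h1, q1, he1⟩ := List.exists_cons_of_ne_nil (pvF1_ne_nil t)
  obtain ⟨h2, q2, he2⟩ := List.exists_cons_of_ne_nil (pvF2_ne_nil t)
  obtain ⟨h3, q3, he3⟩ := List.exists_cons_of_ne_nil (pvF3_ne_nil t)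
  have hp1 : h1 <+: t := pvF1_head_prefix t h1 q1 he1
  have hp2 : h2 <+: t := pvF2_head_prefix t h2 q2 he2
  have hp3 : h3 <+: t := pvF3_head_prefix t h3 q3 he3
  have transfer : ∀ (sep u : List Char), u <+: t → ¬ sep.isPrefixOf (c :: t) →
      ¬ sep.isPrefixOf (c :: u) := by
    intro sep u hu hn hmatch
    rw [List.isPrefixOf_iff_prefix] at hmatch hn
    exact hn (hmatch.trans (List.cons_prefix_cons.mpr ⟨rfl, hu⟩))
  have e1 : pvF1 (c :: t) = (pvF1 t).modifyHead (c :: ·) := by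
    unfold pvF1
    refine pvSpl_cons _ _ _ ?_
    simp only [List.isPrefixOf, Bool.and_eq_true, beq_iff_eq]
    intro h
    exact hc h.1.symm
  have e2 : pvF2 (c :: t) = (pvF2 t).modifyHead (c :: ·) := by
    unfold pvF2
    rw [e1, he1]
    exact stage_cons _ _ _ _ (transfer _ _ hp1 hand)
  have e3 : pvF3 (c :: t) = (pvF3 t).modifyHead (c :: ·) := by
    unfold pvF3
    rw [e2, he2]
    exact stage_cons _ _ _ _ (transfer _ _ hp2 hamp)
  unfold pvF4
  rw [e3, he3]
  refine stage_cons _ _ _ _ ?_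
  simp only [List.isPrefixOf, Bool.and_eq_true, beq_iff_eq]
  intro h
  exact hsc h.1.symm

-- scan lemmas ---------------------------------------------------------------

lemma pvScanB_buf_aux (s buf : List Char) :
    ∀ b : List Char, pvScanB s b = (pvScanB s []).modifyHead (b.reverse ++ ·) := by
  induction s, buf using pvScanB.induct with
  | case1 buf =>
    intro b
    rw [pvScanB, pvScanB]
    simp
  | case2 c rest buf h ih =>
    intro b
    rw [pvScanB, pvScanB]
    simp [h]
  | case3 c rest buf h1 h2 ih =>
    intro b
    rw [pvScanB, pvScanB]
    simp [h1, h2]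
  | case4 c rest buf h1 h2 h3 ih =>
    intro b
    rw [pvScanB, pvScanB]
    simp [h1, h2, h3]
  | case5 c rest buf h1 h2 h3 ih =>
    intro b
    rw [pvScanB, pvScanB]
    simp only [if_neg h1, if_neg h2, if_neg h3]
    rw [ih (c :: b), ih [c]]
    cases pvScanB rest [] <;> simp

lemma pvScanB_buf (s buf : List Char) :
    pvScanB s buf = (pvScanB s []).modifyHead (buf.reverse ++ ·) :=
  pvScanB_buf_aux s buf buf

-- main equivalence of fragment lists ----------------------------------------

lemma infix_of_suffix_infix (x u s : List Char) (hu : u <:+ s) (h : x <:+: u) :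
    x <:+: s := h.trans hu.isInfix

lemma pvMain (n : Nat) : ∀ s : List Char, s.length ≤ n →
    ¬ (" & and ".toList <:+: s) → pvF4 s = pvScanB s [] := by
  induction n using Nat.strong_induction_on with
  | _ n ih =>
    intro s hlen hpre
    cases s with
    | nil =>
      rw [pvScanB]
      simp [pvF4, pvF3, pvF2, pvF1, pvSpl_nil _ (List.cons_ne_nil _ _)]
    | cons c rest =>
      have hrl : rest.length < n := by
        simp only [List.length_cons] at hlen; omega
      by_cases h1 : c = ',' ∨ c = ';'
      · have hpre' : ¬ (" & and ".toList <:+: rest) :=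
          fun h => hpre (infix_of_suffix_infix _ _ _ (List.suffix_cons c rest) h)
        have hrec := ih rest.length hrl rest le_rfl hpre'
        rw [pvScanB]
        rw [if_pos h1]
        rcases h1 with rfl | rfl
        · rw [pvF4_comma, hrec]; simp
        · rw [pvF4_semi, hrec]; simp
      · by_cases h2 : ([' ','a','n','d',' '] : List Char).isPrefixOf (c :: rest)
        · obtain ⟨t', ht'⟩ := List.isPrefixOf_iff_prefix.mp h2
          have hsuf : t' <:+ c :: rest := ⟨[' ','a','n','d',' '], ht'⟩
          have hpre' : ¬ (" & and ".toList <:+: t') :=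
            fun h => hpre (infix_of_suffix_infix _ _ _ hsuf h)
          have htl : t'.length < n := by
            have := congrArg List.length ht'
            simp only [List.length_append, List.length_cons, List.length_nil] at this ⊢
            omega
          have hrec := ih t'.length htl t' le_rfl hpre'
          rw [pvScanB, if_neg h1, if_pos h2]
          have hdrop : List.drop 5 (c :: rest) = t' := by
            rw [← ht']
            simpa using List.drop_left (l₁ := [' ','a','n','d',' ']) (l₂ := t')
          rw [hdrop, ← ht', pvF4_and, hrec]
          simp
        · by_cases h3 : ([' ','&',' '] : List Char).isPrefixOf (c :: rest)
          · obtain ⟨t', ht'⟩ := List.isPrefixOf_iff_prefix.mp h3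
            have hsuf : t' <:+ c :: rest := ⟨[' ','&',' '], ht'⟩
            have hpre' : ¬ (" & and ".toList <:+: t') :=
              fun h => hpre (infix_of_suffix_infix _ _ _ hsuf h)
            have htl : t'.length < n := by
              have := congrArg List.length ht'
              simp only [List.length_append, List.length_cons, List.length_nil] at this ⊢
              omega
            have hrec := ih t'.length htl t' le_rfl hpre'
            rw [pvScanB, if_neg h1, if_neg h2, if_pos h3]
            have hdrop : List.drop 3 (c :: rest) = t' := by
              rw [← ht']
              simpa using List.drop_left (l₁ := [' ','&',' ']) (l₂ := t')
            have hnp : ¬ ((" & and ".toList : List Char) <+: ([' ','&',' '] ++ t')) := by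
              intro h
              apply hpre
              rw [← ht']
              exact h.isInfix
            rw [hdrop, ← ht', pvF4_amp t' (by simpa using hnp), hrec]
            simp
          · have hc : c ≠ ',' := fun h => h1 (Or.inl h)
            have hsc : c ≠ ';' := fun h => h1 (Or.inr h)
            have hpre' : ¬ (" & and ".toList <:+: rest) :=
              fun h => hpre (infix_of_suffix_infix _ _ _ (List.suffix_cons c rest) h)
            have hrec := ih rest.length hrl rest le_rfl hpre'
            rw [pvScanB, if_neg h1, if_neg h2, if_neg h3,
              pvScanB_buf rest [c], pvF4_char c rest hc hsc h2 h3, hrec]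
            simp

-- top-level assembly ---------------------------------------------------------

lemma pvPorts_eq (text : String) (hpre : ¬ (" & and ".toList <:+: text.toList)) :
    parse_ingredients text = parse_ingredients_alt text := by
  have c1 : (",".toList) = [','] := by decide
  have c2 : (" and ".toList) = [' ','a','n','d',' '] := by decide
  have c3 : (" & ".toList) = [' ','&',' '] := by decide
  have c4 : (";".toList) = [';'] := by decide
  have hfold : [",".toList, " and ".toList, " & ".toList, ";".toList].foldl
      (fun ings sep => ings.flatMap (fun ing => PySem.Chars.splitOn ing sep))
      [text.toList] = pvF4 text.toList := by
    simp only [c1, c2, c3, c4, List.foldl_cons, List.foldl_nil, pvF4, pvF3, pvF2, pvF1,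
      List.flatMap_cons, List.flatMap_nil, List.append_nil,
      splitOn_eq_pvSpl _ _ (List.cons_ne_nil _ _)]
  simp only [parse_ingredients, parse_ingredients_alt, hfold,
    pvMain text.toList.length text.toList le_rfl hpre]



-- ===== VERDICT (by name: the statement is the Claim_ definition above) =====
theorem parse_ingredients_spec : Claim_equal_parse_ingredients := by
  intro text _ hpre
  unfold Spec_parse_ingredients
  exact pvPorts_eq text hpre
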